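-- pv_equiv track=rewrite | github.com/esrice/misc-tools | pileup2windows.py | count_refs
-- ===== SOURCE A (Python) =====
-- def count_refs(pileup_base_string):
--     """
--     Given a pileup string from samtools mpileup output,
--     count the number of reads that support the reference
--     allele in that position.
--     """
--     ref_count = 0
--     i = 0
--     while i < len(pileup_base_string):
--         if pileup_base_string[i] in ['.', ',']:
--             ref_count += 1
--         # if the current character is '^', then the next
--         # character will be a PHRED quality, so skip it.
--         elif pileup_base_string[i] in ['^']:
--             i += 1
--         i += 1
--
--         # for other things, like insertions, deletions, and
--         # ends of reads, there will not be any '.' or ','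
--         # characters to confuse us, so we don't need to
--         # actually parse these out since all we care about
--         # is the number of ref alleles
--
--     return ref_count
-- ===== SOURCE B (Python) =====
-- import re
--
-- def count_refs(pileup_base_string):
--     """
--     Given a pileup string from samtools mpileup output,
--     count the number of reads that support the reference
--     allele in that position.
--     """
--     cleaned = re.sub(r'\^.', '', pileup_base_string, flags=re.DOTALL)
--     return cleaned.count('.') + cleaned.count(',')
-- ===== Notes on version B (the rewrite author's own statement) =====
-- stated objective: simpler
-- what changed: Replaces the index-driven while-loop state machine with a regex strip pass (each caret and its quality byte removed) followed by two str.count library passes.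
import Mathlib
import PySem

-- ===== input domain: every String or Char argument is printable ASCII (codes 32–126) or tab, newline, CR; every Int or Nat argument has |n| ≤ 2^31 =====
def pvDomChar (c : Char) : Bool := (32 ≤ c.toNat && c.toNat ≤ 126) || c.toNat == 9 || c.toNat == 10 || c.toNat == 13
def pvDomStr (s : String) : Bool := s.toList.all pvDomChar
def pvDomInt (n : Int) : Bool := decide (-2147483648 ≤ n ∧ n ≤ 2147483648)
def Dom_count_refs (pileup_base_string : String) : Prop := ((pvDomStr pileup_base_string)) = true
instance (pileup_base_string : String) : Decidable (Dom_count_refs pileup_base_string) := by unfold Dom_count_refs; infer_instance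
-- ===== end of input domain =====

-- B replaces A's single-pass index state machine by a strip pass ('^'+quality byte removed) followed by two count passes; objective: simpler.

-- ===== PORT A =====
-- the while loop over index i with accumulator ref_count
def countRefsLoop (s : List Char) (i : Nat) (acc : Int) : Int :=
  if h : i < s.length then
    if s[i] = '.' ∨ s[i] = ',' then countRefsLoop s (i+1) (acc+1)
    else if s[i] = '^' then countRefsLoop s (i+1+1) acc
    else countRefsLoop s (i+1) acc
  else acc
termination_by s.length - i

def count_refs (pileup_base_string : String) : Int :=
  countRefsLoop pileup_base_string.toList 0 0

-- ===== PORT B =====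
-- re.sub(r'\^.', '', s, flags=re.DOTALL): drop each '^' together with the one character after it
def stripCarets : List Char → List Char
  | [] => []
  | ['^'] => ['^']
  | '^' :: _ :: rest => stripCarets rest
  | c :: rest => c :: stripCarets rest

def count_refs_alt (pileup_base_string : String) : Int :=
  let cleaned := stripCarets pileup_base_string.toList
  (cleaned.count '.' : Int) + (cleaned.count ',' : Int)

-- ===== PRECONDITION & SPEC =====
def Spec_count_refs (pileup_base_string : String) (out : Int) : Prop := out = count_refs_alt pileup_base_string
instance (pileup_base_string : String) (out : Int) : Decidable (Spec_count_refs pileup_base_string out) := by unfold Spec_count_refs; infer_instance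

-- ===== CLAIM (what is proved, stated in full; the proofs are below) =====
def Claim_equal_count_refs : Prop := ∀ (pileup_base_string : String), Dom_count_refs pileup_base_string → Spec_count_refs pileup_base_string (count_refs pileup_base_string)

-- ===== LEMMAS AND PROOFS =====

-- list-structured value of B, per suffix
def bVal (l : List Char) : Int :=
  ((stripCarets l).count '.' : Int) + ((stripCarets l).count ',' : Int)

theorem stripCarets_cons_ne (c : Char) (l : List Char) (h : c ≠ '^') :
    stripCarets (c :: l) = c :: stripCarets l := by
  rw [stripCarets.eq_def]
  split
  · simp_all
  · simp_all
  · simp_all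
  · simp_all

theorem bVal_caret2 (x : Char) (l : List Char) : bVal ('^' :: x :: l) = bVal l := by
  simp [bVal, stripCarets]

theorem bVal_ref (c : Char) (l : List Char) (hc : c = '.' ∨ c = ',') :
    bVal (c :: l) = bVal l + 1 := by
  rcases hc with rfl | rfl <;>
  · rw [bVal, bVal, stripCarets_cons_ne _ _ (by decide)]
    simp [List.count_cons]
    ring

theorem bVal_other (c : Char) (l : List Char) (h1 : c ≠ '.') (h2 : c ≠ ',') (h3 : c ≠ '^') :
    bVal (c :: l) = bVal l := by
  rw [bVal, bVal, stripCarets_cons_ne _ _ h3]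
  simp [List.count_cons, h1, h2]

theorem countRefsLoop_drop (s : List Char) (i : Nat) (acc : Int) :
    countRefsLoop s i acc = acc + bVal (s.drop i) := by
  induction i, acc using countRefsLoop.induct (s := s) with
  | case1 i acc h h1 ih =>
    have hd : s.drop i = s[i] :: s.drop (i+1) := List.drop_eq_getElem_cons h
    rw [countRefsLoop, dif_pos h, if_pos h1, ih, hd, bVal_ref _ _ h1]
    ring
  | case2 i acc h h1 h2 ih =>
    have hd : s.drop i = s[i] :: s.drop (i+1) := List.drop_eq_getElem_cons h
    rw [countRefsLoop, dif_pos h, if_neg h1, if_pos h2, ih]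
    by_cases h3 : i + 1 < s.length
    · have hd2 : s.drop (i+1) = s[i+1] :: s.drop (i+1+1) := List.drop_eq_getElem_cons h3
      rw [hd, hd2, h2, bVal_caret2]
    · have e1 : s.drop (i+1) = [] := List.drop_eq_nil_of_le (by omega)
      have e2 : s.drop (i+1+1) = [] := List.drop_eq_nil_of_le (by omega)
      rw [hd, h2, e1, e2]
      simp [bVal, stripCarets]
  | case3 i acc h h1 h2 ih =>
    have hd : s.drop i = s[i] :: s.drop (i+1) := List.drop_eq_getElem_cons h
    have hne1 : s[i] ≠ '.' := fun hc => h1 (Or.inl hc)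
    have hne2 : s[i] ≠ ',' := fun hc => h1 (Or.inr hc)
    rw [countRefsLoop, dif_pos h, if_neg h1, if_neg h2, ih, hd, bVal_other _ _ hne1 hne2 h2]
  | case4 i acc h =>
    rw [countRefsLoop]
    have e : s.drop i = [] := List.drop_eq_nil_of_le (by omega)
    simp [h, e, bVal, stripCarets]

-- ===== VERDICT (by name: the statement is the Claim_ definition above) =====
theorem count_refs_spec : Claim_equal_count_refs := by
  intro s _
  unfold Spec_count_refs count_refs count_refs_alt
  rw [countRefsLoop_drop]
  simp [bVal]
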